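-- pv_equiv track=rewrite | github.com/tatyana33993/docstrings2pdf | docstrings_tkintert.py | is_doctests
-- ===== SOURCE A (Python) =====
-- def is_doctests(value):
--     docstrings_with_flags = []
--     arr = value.split('\n')
--     prev = False
--     for e in arr:
--         if e.find('>>>') != -1 or e.find('...') != -1:
--             prev = True
--             docstrings_with_flags.append((True, e))
--         elif prev:
--             docstrings_with_flags.append((True, e))
--             prev = False
--         else:
--             docstrings_with_flags.append((False, e))
--     return docstrings_with_flags
-- ===== SOURCE B (Python) =====
-- def is_doctests(value):
--     arr = value.split('\n')
--     markers = ['>>>' in e or '...' in e for e in arr]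
--     shifted = [False] + markers[:-1]
--     return [(m or p, e) for e, m, p in zip(arr, markers, shifted)]
-- ===== Notes on version B (the rewrite author's own statement) =====
-- stated objective: alternative
-- what changed: Replaces the stateful three-branch carry loop with table construction: a marker list, a shifted copy of it, and a zip combining tag[i] = marker[i] or marker[i-1].
import Mathlib
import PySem

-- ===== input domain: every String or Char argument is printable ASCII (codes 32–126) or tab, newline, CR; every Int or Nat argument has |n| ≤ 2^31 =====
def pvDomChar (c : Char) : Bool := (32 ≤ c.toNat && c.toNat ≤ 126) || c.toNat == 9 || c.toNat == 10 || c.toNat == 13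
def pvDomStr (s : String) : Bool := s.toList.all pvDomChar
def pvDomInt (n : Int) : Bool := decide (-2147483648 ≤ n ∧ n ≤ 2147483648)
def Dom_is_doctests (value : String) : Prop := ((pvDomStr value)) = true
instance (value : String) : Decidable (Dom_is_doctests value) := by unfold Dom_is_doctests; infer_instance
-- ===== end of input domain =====

-- B replaces A's stateful three-branch carry loop with explicit marker/shifted tables
-- combined by a zip (tag[i] = marker[i] or marker[i-1]); alternative decomposition, same cost.

-- value.split('\n'): sep is the nonempty literal "\n", so split? never returns none; getD [] is unreachable.
def pvSplitNL (value : String) : List String := (PySem.Str.split? value "\n").getD []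

-- ===== PORT A =====
def is_doctests (value : String) : List (Bool × String) :=
  let arr := pvSplitNL value
  (arr.foldl (fun (st : Bool × List (Bool × String)) e =>
    if (PySem.Str.find e ">>>" != -1) || (PySem.Str.find e "..." != -1) then
      (true, st.2 ++ [(true, e)])
    else if st.1 then
      (false, st.2 ++ [(true, e)])
    else
      (false, st.2 ++ [(false, e)])) (false, ([] : List (Bool × String)))).2

-- ===== PORT B =====
-- '>>>' in e or '...' in e
def pvMarker (e : String) : Bool := PySem.Str.isIn ">>>" e || PySem.Str.isIn "..." e

def is_doctests_alt (value : String) : List (Bool × String) :=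
  let arr := pvSplitNL value
  let markers := arr.map pvMarker
  let shifted := false :: markers.dropLast
  (arr.zip (markers.zip shifted)).map (fun p => (p.2.1 || p.2.2, p.1))

-- ===== PRECONDITION & SPEC =====
def Spec_is_doctests (value : String) (out : List (Bool × String)) : Prop := out = is_doctests_alt value
instance (value : String) (out : List (Bool × String)) : Decidable (Spec_is_doctests value out) := by unfold Spec_is_doctests; infer_instance

-- ===== CLAIM (what is proved, stated in full; the proofs are below) =====
def Claim_equal_is_doctests : Prop := ∀ (value : String), Dom_is_doctests value → Spec_is_doctests value (is_doctests value)

-- ===== LEMMAS AND PROOFS =====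

-- A's branch test equals B's per-line marker
lemma pv_cond_eq (e : String) :
    ((PySem.Str.find e ">>>" != -1) || (PySem.Str.find e "..." != -1)) = pvMarker e := by
  have h1 := PySem.Str.find_eq_neg_one_iff e ">>>"
  have h2 := PySem.Str.find_eq_neg_one_iff e "..."
  have g1 := PySem.Str.isIn_iff_infix ">>>" e
  have g2 := PySem.Str.isIn_iff_infix "..." e
  unfold pvMarker
  rw [Bool.eq_iff_iff]
  simp only [Bool.or_eq_true, bne_iff_ne, ne_eq, h1, h2, g1, g2]
  tauto

-- A's carry loop, characterised against B's zip over the full (untruncated-shift) marker table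
lemma pv_loopA_eq (l : List String) :
    ∀ (prev : Bool) (acc : List (Bool × String)),
    (l.foldl (fun (st : Bool × List (Bool × String)) e =>
      if (PySem.Str.find e ">>>" != -1) || (PySem.Str.find e "..." != -1) then
        (true, st.2 ++ [(true, e)])
      else if st.1 then
        (false, st.2 ++ [(true, e)])
      else
        (false, st.2 ++ [(false, e)])) (prev, acc)).2
    = acc ++ (l.zip ((l.map pvMarker).zip (prev :: l.map pvMarker))).map
        (fun p => (p.2.1 || p.2.2, p.1)) := by
  induction l with
  | nil => intro prev acc; simp
  | cons e t ih =>
    intro prev acc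
    have hstep :
        (if (PySem.Str.find e ">>>" != -1) || (PySem.Str.find e "..." != -1) then
          ((true : Bool), acc ++ [((true : Bool), e)])
        else if prev then
          ((false : Bool), acc ++ [((true : Bool), e)])
        else
          ((false : Bool), acc ++ [((false : Bool), e)]))
        = (pvMarker e, acc ++ [(pvMarker e || prev, e)]) := by
      rw [pv_cond_eq e] at *
      cases hm : pvMarker e <;> cases prev <;> simp
    simp only [List.foldl_cons, hstep, ih, List.zip_cons_cons, List.map_cons]
    simp

-- zip truncation: the shifted table may carry the full marker list in place of its dropLast
lemma pv_zip_shift {β : Type} (M : List β) : ∀ (p : β),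
    M.zip (p :: M.dropLast) = M.zip (p :: M) := by
  induction M with
  | nil => intro p; rfl
  | cons m M' ih =>
    intro p
    cases M' with
    | nil => rfl
    | cons b t' =>
      rw [show (m :: b :: t').dropLast = m :: (b :: t').dropLast from rfl,
        List.zip_cons_cons, ih m]
      simp [List.zip_cons_cons]

-- ===== VERDICT (by name: the statement is the Claim_ definition above) =====
theorem is_doctests_spec : Claim_equal_is_doctests := by
  intro value _
  unfold Spec_is_doctests is_doctests is_doctests_alt
  rw [pv_loopA_eq (pvSplitNL value) false [], ← pv_zip_shift ((pvSplitNL value).map pvMarker) false]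
  simp
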